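-- pv_equiv track=rewrite | github.com/edelahoz/zero_levels | src/IO.py | convert_results_to_dict
-- ===== SOURCE A (Python) =====
-- def convert_results_to_dict(maps, iterations):
--
--     list_results = []
--     for res_iter in iterations:
--         dict_results = {}
--         for idx, map_name in enumerate(maps):
--             dict_results[map_name] = res_iter[idx * 4: (idx + 1) * 4]
--             if list_results:
--                 dict_results[map_name] += list_results[-1][map_name]
--         list_results.append(dict_results)
--     return list_results
-- ===== SOURCE B (Python) =====
-- def convert_results_to_dict(maps, iterations):
--     iterations = list(iterations)
--     list_results = [{} for _ in iterations]
--     for idx, map_name in enumerate(maps):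
--         cumulative = []
--         for d, res_iter in zip(list_results, iterations):
--             cumulative = res_iter[idx * 4:(idx + 1) * 4] + cumulative
--             d[map_name] = cumulative
--     return list_results
-- ===== Notes on version B (the rewrite author's own statement) =====
-- stated objective: alternative
-- what changed: B inverts the loop nesting: instead of rebuilding each iteration's dict from the whole previous iteration's dict, it pre-creates one empty dict per iteration and walks maps on the outside, threading a single running cumulative list per map column across the iterations.
import Mathlib
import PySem

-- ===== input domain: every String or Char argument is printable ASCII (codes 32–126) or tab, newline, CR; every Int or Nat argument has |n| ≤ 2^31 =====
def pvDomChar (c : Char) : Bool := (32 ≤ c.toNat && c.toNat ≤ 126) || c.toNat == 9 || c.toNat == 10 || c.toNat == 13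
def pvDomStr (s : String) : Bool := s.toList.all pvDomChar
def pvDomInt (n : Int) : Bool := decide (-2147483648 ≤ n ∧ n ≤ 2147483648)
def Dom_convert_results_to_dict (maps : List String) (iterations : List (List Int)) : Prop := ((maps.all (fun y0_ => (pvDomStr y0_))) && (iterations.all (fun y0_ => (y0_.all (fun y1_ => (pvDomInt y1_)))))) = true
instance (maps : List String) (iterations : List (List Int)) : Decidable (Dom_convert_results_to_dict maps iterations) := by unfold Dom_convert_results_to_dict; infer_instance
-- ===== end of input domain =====

-- B swaps the loop nesting: it walks maps on the outside, threading one running `cumulative`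
-- list per map column across the iterations, instead of rebuilding each iteration's dict from
-- the whole previous dict (objective: alternative decomposition, same cost).

-- ===== PORT A =====
def convert_results_to_dict (maps : List String) (iterations : List (List Int)) : List (List (String × List Int)) :=
  (iterations.foldl
    (fun (list_results : List (PySem.Dict String (List Int))) res_iter =>
      let dict_results :=
        (PySem.List.enumerate maps).foldl
          (fun d (p : Int × String) =>
            let d := d.insert p.2 (PySem.List.slice res_iter (some (p.1 * 4)) (some ((p.1 + 1) * 4)))
            if h : list_results = [] then d
            else d.insert p.2 (d.getD p.2 [] ++ (list_results.getLast h).getD p.2 []))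
          PySem.Dict.empty
      list_results ++ [dict_results])
    [])
  |>.map (·.items)

-- ===== PORT B =====
def convert_results_to_dict_alt (maps : List String) (iterations : List (List Int)) : List (List (String × List Int)) :=
  ((PySem.List.enumerate maps).foldl
    (fun list_results (p : Int × String) =>
      ((list_results.zip iterations).foldl
        (fun (st : List Int × List (PySem.Dict String (List Int))) q =>
          let c := PySem.List.slice q.2 (some (p.1 * 4)) (some ((p.1 + 1) * 4)) ++ st.1
          (c, st.2 ++ [q.1.insert p.2 c]))
        ([], [])).2)
    (iterations.map (fun _ => (PySem.Dict.empty : PySem.Dict String (List Int)))))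
  |>.map (·.items)

-- ===== PRECONDITION & SPEC =====
def Spec_convert_results_to_dict (maps : List String) (iterations : List (List Int)) (out : List (List (String × List Int))) : Prop := out = convert_results_to_dict_alt maps iterations
instance (maps : List String) (iterations : List (List Int)) (out : List (List (String × List Int))) : Decidable (Spec_convert_results_to_dict maps iterations out) := by unfold Spec_convert_results_to_dict; infer_instance

-- ===== CLAIM (what is proved, stated in full; the proofs are below) =====
def Claim_equal_convert_results_to_dict : Prop := ∀ (maps : List String) (iterations : List (List Int)), Dom_convert_results_to_dict maps iterations → Spec_convert_results_to_dict maps iterations (convert_results_to_dict maps iterations)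

-- ===== LEMMAS AND PROOFS =====

/-- `res_iter[idx*4 : (idx+1)*4]`. -/
def pvSl (idx : Int) (r : List Int) : List Int :=
  PySem.List.slice r (some (idx * 4)) (some ((idx + 1) * 4))

/-- The cumulative list for column `idx` after consuming `pre`, starting from `c`. -/
def pvCol (idx : Int) (c : List Int) (pre : List (List Int)) : List Int :=
  pre.foldl (fun a r => pvSl idx r ++ a) c

/-- Reference row dict: one insert per `(idx, name)` pair, value = that column's cumulative. -/
def pvRow (ps : List (Int × String)) (pre : List (List Int)) : PySem.Dict String (List Int) :=
  ps.foldl (fun d p => d.insert p.2 (pvCol p.1 [] pre)) PySem.Dict.empty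

/-- Reference result: row `j` is built from the first `j+1` iterations. -/
def pvRef (ps : List (Int × String)) (its : List (List Int)) : List (PySem.Dict String (List Int)) :=
  (List.range its.length).map (fun j => pvRow ps (its.take (j + 1)))

theorem pvCol_append (idx : Int) (c : List Int) (pre : List (List Int)) (r : List Int) :
    pvCol idx c (pre ++ [r]) = pvSl idx r ++ pvCol idx c pre := by
  simp [pvCol, List.foldl_append]

theorem pvRow_append (ps : List (Int × String)) (p : Int × String) (pre : List (List Int)) :
    pvRow (ps ++ [p]) pre = (pvRow ps pre).insert p.2 (pvCol p.1 [] pre) := by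
  simp [pvRow, List.foldl_append]

/-- Lookup in a fold of inserts: the LAST pair with the sought name wins. -/
theorem pv_get?_foldInsert (u : Int × String → List Int) (ps : List (Int × String))
    (d0 : PySem.Dict String (List Int)) (k : String) :
    (ps.foldl (fun d p => d.insert p.2 (u p)) d0).get? k =
      match ps.reverse.find? (fun q => q.2 == k) with
      | some p => some (u p)
      | none => d0.get? k := by
  induction ps using List.reverseRecOn with
  | nil => simp
  | append_singleton ps p ih =>
    rw [List.foldl_append]
    simp only [List.foldl_cons, List.foldl_nil, List.reverse_append, List.reverse_singleton,
      List.singleton_append, List.find?_cons]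
    rw [PySem.Dict.get?_insert]
    by_cases hk : k = p.2
    · simp [hk]
    · have : (p.2 == k) = false := by simp [Ne.symm hk]
      simp [this, hk, ih]

theorem pv_get?_pvRow (ps : List (Int × String)) (pre : List (List Int)) (k : String)
    (p : Int × String) (hf : ps.reverse.find? (fun q => q.2 == k) = some p) :
    (pvRow ps pre).get? k = some (pvCol p.1 [] pre) := by
  rw [pvRow, pv_get?_foldInsert, hf]

theorem pv_nodup_keys_foldInsert (u : Int × String → List Int) (ps : List (Int × String)) :
    (ps.foldl (fun d p => d.insert p.2 (u p)) PySem.Dict.empty).keys.Nodup := by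
  exact PySem.Dict.nodup_keys_foldl_insert_key ps (fun p => p.2) (fun _ p => u p) _
    (by simp)

/-- Two insert-folds over the same pairs agree as soon as their values agree on every
    pair that is the last occurrence of its name. -/
theorem pv_foldInsert_ext (u w : Int × String → List Int) (ps : List (Int × String))
    (h : ∀ k p, ps.reverse.find? (fun q => q.2 == k) = some p → u p = w p) :
    ps.foldl (fun d p => d.insert p.2 (u p)) PySem.Dict.empty =
      ps.foldl (fun d p => d.insert p.2 (w p)) PySem.Dict.empty := by
  apply PySem.Dict.ext
  rw [PySem.Dict.items_eq_map_keys _ (pv_nodup_keys_foldInsert u ps) [],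
    PySem.Dict.items_eq_map_keys _ (pv_nodup_keys_foldInsert w ps) []]
  have hkeys : (ps.foldl (fun d p => d.insert p.2 (u p)) PySem.Dict.empty).keys =
      (ps.foldl (fun d p => d.insert p.2 (w p)) PySem.Dict.empty).keys := by
    rw [PySem.Dict.keys_foldl_insert_key ps (fun p => p.2) (fun _ p => u p),
      PySem.Dict.keys_foldl_insert_key ps (fun p => p.2) (fun _ p => w p)]
  rw [hkeys]
  apply List.map_congr_left
  intro k _
  rw [PySem.Dict.getD_eq_get?_getD, PySem.Dict.getD_eq_get?_getD,
    pv_get?_foldInsert, pv_get?_foldInsert]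
  cases hf : ps.reverse.find? (fun q => q.2 == k) with
  | none => rfl
  | some p => simp [h k p hf]

/-- B's inner loop over `zip rows its`, rows given as a map over `range`. -/
theorem pv_inner_spec (p : Int × String) (its : List (List Int))
    (g : Nat → PySem.Dict String (List Int)) (c : List Int)
    (acc : List (PySem.Dict String (List Int))) :
    ((((List.range its.length).map g).zip its).foldl
        (fun (st : List Int × List (PySem.Dict String (List Int))) q =>
          let c' := PySem.List.slice q.2 (some (p.1 * 4)) (some ((p.1 + 1) * 4)) ++ st.1
          (c', st.2 ++ [q.1.insert p.2 c']))
        (c, acc)) =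
      (pvCol p.1 c its,
       acc ++ (List.range its.length).map
         (fun j => (g j).insert p.2 (pvCol p.1 c (its.take (j + 1))))) := by
  induction its generalizing g c acc with
  | nil => simp [pvCol]
  | cons r its ih =>
    rw [List.length_cons, List.range_succ_eq_map]
    rw [List.map_cons, List.map_map, List.zip_cons_cons, List.foldl_cons]
    refine Eq.trans (ih (fun j => g (j + 1)) _ _) (Prod.ext rfl ?_)
    rw [List.map_cons, List.map_map, List.append_assoc, List.singleton_append]
    exact congrArg (acc ++ ·) (congrArg (List.cons _) (List.map_congr_left (fun j _ => rfl)))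

/-- B's dict list equals the reference rows. -/
theorem pv_B_eq_ref (its : List (List Int)) (ps : List (Int × String)) :
    ps.foldl
      (fun list_results (p : Int × String) =>
        ((list_results.zip its).foldl
          (fun (st : List Int × List (PySem.Dict String (List Int))) q =>
            let c := PySem.List.slice q.2 (some (p.1 * 4)) (some ((p.1 + 1) * 4)) ++ st.1
            (c, st.2 ++ [q.1.insert p.2 c]))
          ([], [])).2)
      (its.map (fun _ => PySem.Dict.empty)) = pvRef ps its := by
  induction ps using List.reverseRecOn with
  | nil =>
    simp only [List.foldl_nil, pvRef]
    have : ∀ (l : List (List Int)),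
        l.map (fun _ => (PySem.Dict.empty : PySem.Dict String (List Int))) =
          (List.range l.length).map (fun _ => PySem.Dict.empty) := by
      intro l
      induction l with
      | nil => rfl
      | cons x l ih =>
        rw [List.map_const', List.map_const', List.length_range]
    rw [this]
    rfl
  | append_singleton ps p ih =>
    rw [List.foldl_append, List.foldl_cons, List.foldl_nil, ih, pvRef]
    rw [pv_inner_spec p its (fun j => pvRow ps (its.take (j + 1))) [] []]
    simp only [List.nil_append, pvRef]
    apply List.map_congr_left
    intro j _
    rw [pvRow_append]

/-- A's new row (previous rows nonempty) equals the reference row for the extended prefix. -/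
theorem pv_A_row (maps : List String) (its : List (List Int)) (r : List Int) :
    ((PySem.List.enumerate maps).foldl
        (fun d (p : Int × String) =>
          d.insert p.2 (PySem.List.slice r (some (p.1 * 4)) (some ((p.1 + 1) * 4)) ++
            (pvRow (PySem.List.enumerate maps) its).getD p.2 []))
        PySem.Dict.empty) =
      pvRow (PySem.List.enumerate maps) (its ++ [r]) := by
  refine Eq.trans (pv_foldInsert_ext _ (fun p => pvCol p.1 [] (its ++ [r]))
    (PySem.List.enumerate maps) ?_) rfl
  intro k p hf
  have hpk : p.2 = k := by
    have := List.find?_some hf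
    exact eq_of_beq this
  have hget := pv_get?_pvRow (PySem.List.enumerate maps) its k p hf
  rw [hpk, PySem.Dict.getD_eq_get?_getD, hget]
  show PySem.List.slice r (some (p.1 * 4)) (some ((p.1 + 1) * 4)) ++ pvCol p.1 [] its =
    pvCol p.1 [] (its ++ [r])
  rw [pvCol_append]
  rfl

/-- A's fold equals the reference rows. -/
theorem pv_A_eq_ref (maps : List String) (its : List (List Int)) :
    its.foldl
      (fun (list_results : List (PySem.Dict String (List Int))) res_iter =>
        let dict_results :=
          (PySem.List.enumerate maps).foldl
            (fun d (p : Int × String) =>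
              let d := d.insert p.2 (PySem.List.slice res_iter (some (p.1 * 4)) (some ((p.1 + 1) * 4)))
              if h : list_results = [] then d
              else d.insert p.2 (d.getD p.2 [] ++ (list_results.getLast h).getD p.2 []))
            PySem.Dict.empty
        list_results ++ [dict_results])
      [] = pvRef (PySem.List.enumerate maps) its := by
  induction its using List.reverseRecOn with
  | nil => rfl
  | append_singleton its r ih =>
    rw [List.foldl_append, List.foldl_cons, List.foldl_nil, ih]
    have href : pvRef (PySem.List.enumerate maps) (its ++ [r]) =
        pvRef (PySem.List.enumerate maps) its ++ [pvRow (PySem.List.enumerate maps) (its ++ [r])] := by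
      simp only [pvRef, List.length_append, List.length_singleton, List.range_succ,
        List.map_append, List.map_cons, List.map_nil]
      congr 1
      · apply List.map_congr_left
        intro j hj
        rw [List.mem_range] at hj
        rw [List.take_append_of_le_length (by omega)]
      · rw [List.take_of_length_le (by simp)]
    rw [href]
    refine congrArg (fun x => pvRef (PySem.List.enumerate maps) its ++ [x]) ?_
    by_cases hits : its = []
    · subst hits
      rw [show pvRef (PySem.List.enumerate maps) ([] : List (List Int)) = [] from rfl]
      rw [show pvRow (PySem.List.enumerate maps) (([] : List (List Int)) ++ [r]) =
          (PySem.List.enumerate maps).foldl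
            (fun d p => d.insert p.2 (pvSl p.1 r ++ [])) PySem.Dict.empty from rfl]
      simp [pvSl]
    · have hne : pvRef (PySem.List.enumerate maps) its ≠ [] := by
        simp only [pvRef, ne_eq, List.map_eq_nil_iff, List.range_eq_nil, List.length_eq_zero_iff]
        exact hits
      simp only [dif_neg hne]
      have h? : (pvRef (PySem.List.enumerate maps) its).getLast? =
          some (pvRow (PySem.List.enumerate maps) its) := by
        obtain ⟨m, hm⟩ : ∃ m, its.length = m + 1 := by
          cases its with
          | nil => exact absurd rfl hits
          | cons a l => exact ⟨l.length, rfl⟩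
        rw [pvRef, hm, List.range_succ, List.map_append, List.map_cons, List.map_nil,
          List.getLast?_concat]
        rw [List.take_of_length_le (by omega)]
      have hlast : (pvRef (PySem.List.enumerate maps) its).getLast hne =
          pvRow (PySem.List.enumerate maps) its :=
        Option.some.inj ((List.getLast?_eq_some_getLast hne).symm.trans h?)
      rw [hlast]
      have hcollapse : (fun (d : PySem.Dict String (List Int)) (p : Int × String) =>
            ((d.insert p.2 (PySem.List.slice r (some (p.1 * 4)) (some ((p.1 + 1) * 4)))).insert p.2
              ((d.insert p.2 (PySem.List.slice r (some (p.1 * 4)) (some ((p.1 + 1) * 4)))).getD p.2 [] ++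
                (pvRow (PySem.List.enumerate maps) its).getD p.2 []))) =
          (fun (d : PySem.Dict String (List Int)) (p : Int × String) =>
            d.insert p.2 (PySem.List.slice r (some (p.1 * 4)) (some ((p.1 + 1) * 4)) ++
              (pvRow (PySem.List.enumerate maps) its).getD p.2 [])) := by
        funext d p
        rw [PySem.Dict.getD_insert_self, PySem.Dict.insert_insert_self]
      rw [hcollapse]
      exact pv_A_row maps its r

-- ===== VERDICT (by name: the statement is the Claim_ definition above) =====
theorem convert_results_to_dict_spec : Claim_equal_convert_results_to_dict := by
  intro maps iterations _
  unfold Spec_convert_results_to_dict convert_results_to_dict convert_results_to_dict_alt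
  rw [pv_A_eq_ref maps iterations, pv_B_eq_ref iterations (PySem.List.enumerate maps)]
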